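/- GENERATED by mk_final_copies.py from the proof of the farm's unit `start_decoder.8` (farm:start_decoder.8.1: Proof.lean) as the
   re-elaboration sweep compiled it — do not edit. -/
/-
  Unit `start_decoder.8` (CONTRACTS 113, part 1; stb_vorbis_fixed.c:3707-3718): the framing bit of the comment header, then the
  do-while that skips the rest of the comment packet.

      114127 mov rdi, rbp ; call get8_packet ; test al, 1 ; je 1141ad
      114133 lea rdi, [rbp+6D4H] ; call __asan_load1 ; movzx esi, [rbp+6D4H] ; mov rdi, rbp ; call skip ; mov byte [rbp+6D4H], 0
      114155 L: mov rdi, rbp ; call next_segment ; mov ebx, eax ; mov [rsp+24H], eax ; mov esi, eax ; mov rdi, rbp ; call skip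
             lea rdi, [rbp+6D4H] ; call __asan_store1 ; mov byte [rbp+6D4H], 0 ; test ebx, ebx ; jne L          → 114184 = At9
      1141ad mov esi, 14H ; mov rdi, rbp ; call error ; jmp 113b22                                                → 113b22 = AtERR

  HOW IT IS PROVED. The memory-dependent part of the assertions is ONE structure `Mid8 g A mem` (Lemmas.lean: `SDw 1`, CM1 – CM3,
  the shadow layer, SH7, the function's footprint, the seven saved slots), and ONE lemma `Mid8.stepFoot` carries it over a stretch
  whose footprint lies inside the literal list `Foot8 g.e` (the stack below the steady stack pointer, the spill slot `[R+24H, R+28H)`,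
  the six windows of `*f` that the packet readers write), given `Bits` at the end of the stretch (a callee's post, or a store lemma).
  The walk is cut into stretches at every callee's return: `v → get8_packet → skip → (head) → next_segment → skip → (head | At9)`,
  and `→ error → AtERR`. At each return `Foot8` is proved by `u_same`, `Mid8` by `stepFoot`.

  THE LOOP (head 0x114155 = `L.start_decoder.loop5`): invariant = `Mid8 g A s.mem`, `bytes_in_seg = 0`, DF, the MXCSR masks, the
  walker's `w_rip w_rsp w_eq w_kept`; measure `mu s.mem f`. The back edge is taken only when next_segment returned `len ≠ 0`, and then
  its post gives `mu` STRICTLY smaller; skip, the two spills and the store `bytes_in_seg = 0` do not raise it (`store_bytes0`).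
  At the exit `len = 0` is what the body spilled to dword `[rsp+24H]` (Z24), read back through skip's footprint (`u_frame`).
-/
import Asan.CheckWalk
import Vorbis.Spec.Units.start_decoder_8
import Vorbis.Spec.Worked.start_decoder_8_Lemmas

open X86 X86.User Asan Vorbis Vorbis.Spec Vorbis.Spec.StartDecoder

set_option maxRecDepth 4000
set_option maxHeartbeats 4000000

namespace Vorbis.Spec.start_decoder_8

end Vorbis.Spec.start_decoder_8

/-- Segment 8 of `start_decoder` (0x114127 … 0x114182 + the stub 0x1141ad … 0x1141ba): from `At8` to `At9` (0x114184) or `AtERR`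
(0x113b22). The lemmas are in Lemmas.lean (namespace `Vorbis.Spec.start_decoder_8`). -/
theorem Vorbis.Spec.Worked.start_decoder_8_ok : Vorbis.Spec.start_decoder_8.Statement := by
  intro Lay hLay μ hμ u₀ hcode h_get8 hload1 h_skip h_next hstore1 h_error g v hat
  -- 1. the entry assertion: the ghost arena, `Mid8` of the entry memory, the geometry of the activation
  obtain ⟨A, hb⟩ := hat
  have hmid0 := Vorbis.Spec.start_decoder_8.Mid8.of_body hb
  obtain ⟨hfr, hhand, hrbp, hsd, hnoT, hcm⟩ := hb
  have hgeo := Vorbis.Spec.start_decoder_8.geo_of hfr hhand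
  have he := hfr.entry
  v_entry he
  simp only [depth] at he_room he_stack
  have eRA : g.RA = (g.e.reg .rsp).toNat := rfl
  have ef : g.f = (g.e.reg .rdi).toNat := rfl
  have hR := hgeo.r
  have hobj := hgeo.obj
  have hobr := hsd.bits.OBR
  simp only [voff] at hobr
  -- 2. the present state under names the walker keeps (`c_…`: facts about `v` that must survive the first step)
  have w_rip := hfr.rip
  have c_rsp : v.reg .rsp = g.e.reg .rsp - 1480 := by
    rw [hfr.rsp]
    unfold Ghost.R Ghost.RA steady
    have h1480 : (1480 : Nat) ≤ (g.e.reg .rsp).toNat := by omega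
    rw [← addr_sub_lit _ _ h1480, addr_toNat]
  have eR : g.e.reg .rsp - 1480 = addr g.R := hfr.rsp.symm.trans c_rsp |>.symm
  have c_rbp : v.reg .rbp = g.e.reg .rdi := by
    rw [hrbp]
    exact addr_toNat _
  clear hrbp
  have w_eq : Mem.EqOn Vorbis.L.textLo Vorbis.L.textHi u₀.mem v.mem := hfr.code
  have hdf : v.flags .df = false := (show abiInv _ from hfr.inv).1
  have hmx : v.mxcsr &&& 0x1F80 = 0x1F80 := (show abiInv _ from hfr.inv).2
  have hsse := Vorbis.sseOK_of_abiInv hfr.inv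
  -- 3. the callees' contracts, instantiated with the function's own frame active (`g.frames'`)
  have hg8 := h_get8 A.2 g.frames' (g.Blk A) g.len
  have hsk := h_skip A.2 g.frames' (g.Blk A) g.len
  have hns := h_next A.2 g.frames' (g.Blk A) g.len
  have herr := h_error A.2 g.frames'
  -- 0x114127 (stb_vorbis_fixed.c:3707): `x = get8_packet(f)`
  u_walk hcode [hμ.vendor] until [Vorbis.L.start_decoder.cut69, Vorbis.L.start_decoder.cut4] span [Vorbis.L.textLo, Vorbis.L.textHi] side (v_side)
  case call_inv => v_inv
  case pre_11412a =>
    have hun : ShadowUntouched v.mem s_11412a.mem := by v_untouched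
    have hS : Mem.SameExcept [⟨(g.e.reg .rsp).toNat - 1488, (g.e.reg .rsp).toNat - 1480⟩] v.mem s_11412a.mem := by
      u_same
    obtain ⟨hbc, -⟩ := Vorbis.Spec.Reader.reader_of_window hmid0.sd.bits hS (by omega)
    exact Vorbis.Spec.start_decoder_8.readerPre_of hmid0 hhand hfr.offText hun (by u_omega) (by u_omega) (by u_omega)
      (by rw [w_rdi]; exact ef.symm) hbc
  -- 0x11412f: get8_packet has returned; its footprint lies inside `Foot8`, its post gives `Bits` back
  v_after_call w_rsp_11412a w_mem_11412a
  simp only [w_rdi_11412a] at w_same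
  have hp1 : Get8PacketPost (g.Blk A) g.len (s_11412a.reg .rdi).toNat s_11412a s_11412ar := w_post
  rw [w_rdi_11412a] at hp1
  have hS1 : Mem.SameExcept (Vorbis.Spec.start_decoder_8.Foot8 g.e) v.mem s_11412ar.mem := by
    simp only [Vorbis.Spec.start_decoder_8.Foot8]
    u_same
  have hmid1 := hmid0.stepFoot hgeo hhand hS1 hp1.reader.bits
  clear w_same w_post hS1 hp1 w_mem_11412a hmid0 hsd hcm
  u_walk hcode [hμ.vendor] until [Vorbis.L.start_decoder.cut69, Vorbis.L.start_decoder.cut4] span [Vorbis.L.textLo, Vorbis.L.textHi] side (v_side)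
  case call_inv => v_inv
  case pre_1141b5 =>
    -- 0x1141b5 (line 3708): `error(f, VORBIS_invalid_setup)`
    have hun : ShadowUntouched s_11412ar.mem s_1141b5.mem := by v_untouched
    refine ⟨Vorbis.Spec.start_decoder_8.shadowPre_of hmid1 hfr.offText hun (by u_omega) (by u_omega) (by u_omega), ?_⟩
    rw [w_rdi]
    exact Vorbis.Spec.start_decoder_8.obj_live hmid1 hhand
  case check_11413a =>
    -- 0x11413a (line 3711): the load of `f->bytes_in_seg`
    have hun : ShadowUntouched s_11412ar.mem s_11413a.mem := by v_untouched
    have hl := Vorbis.Spec.start_decoder_8.obj_live hmid1 hhand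
    refine hl.accSmall hmid1.shadow hun _ 1 (by decide) (by u_omega) ?_
    simp only [Vorbis.Off.sizeof.stb_vorbis]
    u_omega
  case call_inv => v_inv
  case pre_114149 =>
    -- 0x114149 (line 3711): `skip(f, f->bytes_in_seg)`
    have hun : ShadowUntouched s_11412ar.mem s_114149.mem := by v_untouched
    have hS : Mem.SameExcept [⟨(g.e.reg .rsp).toNat - 1488, (g.e.reg .rsp).toNat - 1480⟩] s_11412ar.mem s_114149.mem := by
      u_same
    obtain ⟨hbc, -⟩ := Vorbis.Spec.Reader.reader_of_window hmid1.sd.bits hS (by omega)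
    refine ⟨Vorbis.Spec.start_decoder_8.readerPre_of hmid1 hhand hfr.offText hun (by u_omega) (by u_omega) (by u_omega)
      (by rw [w_rdi]; exact ef.symm) hbc, ?_⟩
    rw [w_rsi]
    exact Vorbis.Spec.start_decoder_8.argInt_nonneg _ (Nat.lt_trans (Vorbis.Spec.start_decoder_8.movzx_byte_lt _) (by decide))
  · -- 0x1141ba: `error` has returned 0; `jmp 113b22`
    v_after_call w_rsp_1141b5 w_mem_1141b5
    simp only [w_rdi_1141b5] at w_same
    obtain ⟨w_rax, -, -⟩ := w_post
    have hSs : Mem.SameExcept [⟨(g.e.reg .rsp).toNat - 1888, (g.e.reg .rsp).toNat - 1480⟩,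
        ⟨(g.e.reg .rdi).toNat + 136, (g.e.reg .rdi).toNat + 144⟩] s_11412ar.mem s_1141b5r.mem := by
      u_same
    have hbe : Bits (g.Blk A) g.len s_1141b5r.mem g.f := by
      apply Vorbis.Spec.start_decoder_8.bits_other hmid1.sd.bits hSs
      intro w hw
      simp only [List.mem_cons, List.mem_nil_iff, or_false] at hw
      rcases hw with rfl | rfl <;> simp only [] <;> omega
    have hSe : Mem.SameExcept (Vorbis.Spec.start_decoder_8.Foot8 g.e) s_11412ar.mem s_1141b5r.mem := by
      simp only [Vorbis.Spec.start_decoder_8.Foot8]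
      u_same
    have hmidE := hmid1.stepFoot hgeo hhand hSe hbe
    clear w_same hSs hSe hmid1 w_mem_1141b5
    u_walk hcode [hμ.vendor] until [Vorbis.L.start_decoder.cut69, Vorbis.L.start_decoder.cut4] span [Vorbis.L.textLo, Vorbis.L.textHi] side (v_side)
    refine ReachVia.done (Or.inr ?_)
    refine Vorbis.Spec.start_decoder_8.atErr_of hfr hhand ?_ w_rip (w_rsp.trans eR) w_eq (by v_inv) ?_
    · rw [w_mem]
      exact hmidE
    · rw [w_rax]
      rfl
  · -- 0x11414e (line 3712): `skip` has returned; `f->bytes_in_seg = 0`, then the head of the do-while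
    v_after_call w_rsp_114149 w_mem_114149
    simp only [w_rdi_114149] at w_same
    have hp2 : SkipPost (g.Blk A) g.len (s_114149.reg .rdi).toNat (argInt (s_114149.reg .rsi)) s_114149 s_114149r := w_post
    rw [w_rdi_114149] at hp2
    have hS2 : Mem.SameExcept (Vorbis.Spec.start_decoder_8.Foot8 g.e) s_11412ar.mem s_114149r.mem := by
      simp only [Vorbis.Spec.start_decoder_8.Foot8]
      u_same
    have hmid2 := hmid1.stepFoot hgeo hhand hS2 hp2.reader.bits
    clear w_same w_post hS2 hp2 w_mem_114149 hmid1
    u_walk hcode [hμ.vendor] until [Vorbis.L.start_decoder.cut69, Vorbis.L.start_decoder.cut4, Vorbis.L.start_decoder.loop5] span [Vorbis.L.textLo, Vorbis.L.textHi] side (v_side)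
    -- 0x114155, the head of the do-while (line 3715): the invariant is `Mid8`, `bytes_in_seg = 0`, DF, MXCSR; the measure is μ
    have ea : g.e.reg .rdi + 1748 = addr (g.f + 1748) := by
      rw [← addr_add_lit, ef, addr_toNat]
    have hst := Vorbis.Spec.start_decoder_8.store_bytes0 hmid2.sd.bits
    rw [← ea, ← w_mem] at hst
    obtain ⟨hbL, -, hb0⟩ := hst
    have hSL : Mem.SameExcept (Vorbis.Spec.start_decoder_8.Foot8 g.e) s_114149r.mem s_11414e.mem := by
      simp only [Vorbis.Spec.start_decoder_8.Foot8]
      u_same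
    have hmidL := hmid2.stepFoot hgeo hhand hSL hbL
    have hdfL : s_11414e.flags .df = false := by
      rw [w_flags]
      exact w_df
    have hmxL : s_11414e.mxcsr &&& 0x1F80 = 0x1F80 := by
      rw [w_mxcsr]
      exact w_mx
    replace w_kept := w_kept.mono_all (S' := [.rsp, .rdi, .rax, .rcx, .rdx, .rsi, .r8, .r9, .r10, .r11, .r16, .r17, .r18,
      .r19, .r20, .r21, .r22, .r23, .r24, .r25, .r26, .r27, .r28, .r29, .r30, .r31, .rbx]) (by rfl)
    clear w_mem w_flags w_mxcsr hSL hbL hmid2 w_df w_mx w_sse w_code w_inv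
    u_loop (fun s => Vorbis.mu s.mem g.f)
    u_walk hcode [hμ.vendor] until [Vorbis.L.start_decoder.cut69, Vorbis.L.start_decoder.cut4, Vorbis.L.start_decoder.loop5] span [Vorbis.L.textLo, Vorbis.L.textHi] side (v_side)
    case call_inv => v_inv
    case pre_114158 =>
      -- 0x114158 (line 3715): `len = next_segment(f)`
      have hun : ShadowUntouched s_11414e.mem s_114158.mem := by v_untouched
      have hS : Mem.SameExcept [⟨(g.e.reg .rsp).toNat - 1488, (g.e.reg .rsp).toNat - 1480⟩] s_11414e.mem s_114158.mem := by
        u_same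
      obtain ⟨hbc, -⟩ := Vorbis.Spec.Reader.reader_of_window hmidL.sd.bits hS (by omega)
      exact Vorbis.Spec.start_decoder_8.readerPre_of hmidL hhand hfr.offText hun (by u_omega) (by u_omega) (by u_omega)
        (by rw [w_rdi]; exact ef.symm) hbc
    -- 0x11415d: next_segment has returned `len` in eax
    v_after_call w_rsp_114158 w_mem_114158
    simp only [w_rdi_114158] at w_same
    have hp3 : NextSegmentPost (g.Blk A) g.len (s_114158.reg .rdi).toNat s_114158 s_114158r := w_post
    rw [w_rdi_114158, ← ef] at hp3
    -- μ and `bytes_in_seg` at the call are those of the head (the push of the return address is off `*f`)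
    have hSc : Mem.SameExcept [⟨(g.e.reg .rsp).toNat - 1488, (g.e.reg .rsp).toNat - 1480⟩] s_11414e.mem s_114158.mem := by
      rw [w_mem_114158]
      u_same
    obtain ⟨-, hmuc⟩ := Vorbis.Spec.Reader.reader_of_window hmidL.sd.bits hSc (by omega)
    have hS3 : Mem.SameExcept (Vorbis.Spec.start_decoder_8.Foot8 g.e) s_11414e.mem s_114158r.mem := by
      simp only [Vorbis.Spec.start_decoder_8.Foot8]
      u_same
    have hmid3 := hmidL.stepFoot hgeo hhand hS3 hp3.reader.bits
    obtain ⟨z, w_rax⟩ : ∃ z, s_114158r.reg .rax = z := ⟨_, rfl⟩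
    have hz : z.toNat < 256 := by
      rw [← w_rax]
      exact hp3.byte
    have hmu3 : z ≠ 0 → mu s_114158r.mem g.f < mu s_11414e.mem g.f := by
      intro hne
      rw [← w_rax] at hne
      have := (hp3.segment hne).2
      omega
    have hmu3' : mu s_114158r.mem g.f ≤ mu s_11414e.mem g.f := by
      have := hp3.reader.mu_le
      omega
    clear w_same w_post hS3 hSc hp3 hmuc w_mem_114158
    u_walk hcode [hμ.vendor] until [Vorbis.L.start_decoder.cut69, Vorbis.L.start_decoder.cut4, Vorbis.L.start_decoder.loop5] span [Vorbis.L.textLo, Vorbis.L.textHi] side (v_side)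
    case call_inv => v_inv
    case pre_114168 =>
      -- 0x114168 (line 3716): `skip(f, len)`; the spill of `len` to dword [rsp+24H] and the return address are off `*f`
      have hun : ShadowUntouched s_114158r.mem s_114168.mem := by v_untouched
      have hS : Mem.SameExcept [⟨(g.e.reg .rsp).toNat - 1488, (g.e.reg .rsp).toNat - 1440⟩] s_114158r.mem s_114168.mem := by
        u_same
      obtain ⟨hbc, -⟩ := Vorbis.Spec.Reader.reader_of_window hmid3.sd.bits hS (by omega)
      refine ⟨Vorbis.Spec.start_decoder_8.readerPre_of hmid3 hhand hfr.offText hun (by u_omega) (by u_omega) (by u_omega)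
        (by rw [w_rdi]; exact ef.symm) hbc, ?_⟩
      rw [w_rsi, Vorbis.Spec.Reader.ofBV_part32_of_lt z (by omega)]
      exact Vorbis.Spec.start_decoder_8.argInt_nonneg _ (by omega)
    -- 0x11416d (line 3717): skip has returned
    have w_eq := Vorbis.conv_code_eqOn w_code
    have w_df := (show X86.User.abiInv _ from w_inv).1
    have w_mx := (show X86.User.abiInv _ from w_inv).2
    simp only [X86.User.Spec.footprint, vspec, w_rsp_114168, w_rdi_114168] at w_same
    have hp4 : SkipPost (g.Blk A) g.len (s_114168.reg .rdi).toNat (argInt (s_114168.reg .rsi)) s_114168 s_114168r := w_post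
    rw [w_rdi_114168, ← ef] at hp4
    -- the spill slot of `len` (dword [rsp+24H]), through skip's footprint
    have hq : s_114168.mem.readLE (g.e.reg .rsp - 1444) 4 = (Word.part .w32 z).toNat % 256 ^ 4 := by
      rw [w_mem_114168]
      u_read
    have hz24 : s_114168r.mem.readLE (g.e.reg .rsp - 1444) 4 = (Word.part .w32 z).toNat % 256 ^ 4 := by
      u_frame hq
    rw [w_mem_114168] at w_same
    have hSc : Mem.SameExcept [⟨(g.e.reg .rsp).toNat - 1488, (g.e.reg .rsp).toNat - 1440⟩] s_114158r.mem s_114168.mem := by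
      rw [w_mem_114168]
      u_same
    obtain ⟨-, hmuc⟩ := Vorbis.Spec.Reader.reader_of_window hmid3.sd.bits hSc (by omega)
    have hS4 : Mem.SameExcept (Vorbis.Spec.start_decoder_8.Foot8 g.e) s_114158r.mem s_114168r.mem := by
      simp only [Vorbis.Spec.start_decoder_8.Foot8]
      u_same
    have hmid4 := hmid3.stepFoot hgeo hhand hS4 hp4.reader.bits
    have hmu4 : mu s_114168r.mem g.f ≤ mu s_114158r.mem g.f := by
      have := hp4.reader.mu_le
      omega
    clear w_same w_post hS4 hSc hp4 hmuc w_mem_114168 hq hmid3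
    u_walk hcode [hμ.vendor] until [Vorbis.L.start_decoder.cut69, Vorbis.L.start_decoder.cut4, Vorbis.L.start_decoder.loop5] span [Vorbis.L.textLo, Vorbis.L.textHi] side (v_side)
    case check_114174 =>
      -- 0x114174 (line 3717): the store of `f->bytes_in_seg`
      have hun : ShadowUntouched s_114168r.mem s_114174.mem := by v_untouched
      have hl := Vorbis.Spec.start_decoder_8.obj_live hmid4 hhand
      refine hl.accSmall hmid4.shadow hun _ 1 (by decide) (by u_omega) ?_
      simp only [Vorbis.Off.sizeof.stb_vorbis]
      u_omega
    · -- 0x114182 `jne` taken (line 3718, `len ≠ 0`): the back edge; μ dropped strictly at next_segment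
      have hk := Vorbis.Spec.Reader.store_off_obj hmid4.sd.bits (g.e.reg .rsp - 1488) 8 1130873 (by u_omega) (by u_omega)
      have hst := Vorbis.Spec.start_decoder_8.store_bytes0 hk.1.bits
      rw [← ea, ← w_mem] at hst
      obtain ⟨hbN, hmuN, hb0N⟩ := hst
      have hSN : Mem.SameExcept (Vorbis.Spec.start_decoder_8.Foot8 g.e) s_114168r.mem s_114182.mem := by
        simp only [Vorbis.Spec.start_decoder_8.Foot8]
        u_same
      have hmidN := hmid4.stepFoot hgeo hhand hSN hbN
      have hzne : z ≠ 0 := by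
        intro h
        rw [h] at hbr_114182
        exact hbr_114182 (by decide)
      have hlt := hmu3 hzne
      have hk2 := hk.1.mu_le
      u_loop_back
      · rw [w_flags]
        simp only [X86.User.df_setStatus]
        exact w_df_114174
      · rw [w_mxcsr]
        exact w_mx
      · omega
    · -- 0x114184 (`len = 0`): the exit to segment .9 with Z24 and `bytes_in_seg = 0`
      have hk := Vorbis.Spec.Reader.store_off_obj hmid4.sd.bits (g.e.reg .rsp - 1488) 8 1130873 (by u_omega) (by u_omega)
      have hst := Vorbis.Spec.start_decoder_8.store_bytes0 hk.1.bits
      rw [← ea, ← w_mem] at hst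
      obtain ⟨hbN, -, hb0N⟩ := hst
      have hSN : Mem.SameExcept (Vorbis.Spec.start_decoder_8.Foot8 g.e) s_114168r.mem s_114182.mem := by
        simp only [Vorbis.Spec.start_decoder_8.Foot8]
        u_same
      have hmidN := hmid4.stepFoot hgeo hhand hSN hbN
      have h0 : s_114168r.mem.readLE (g.e.reg .rsp - 1444) 4 = 0 := by
        rw [hz24, hbr_114182]
      have hz0 : s_114182.mem.readLE (g.e.reg .rsp - 1444) 4 = 0 := by
        u_frame h0
      have e24 : addr (g.R + 0x24) = g.e.reg .rsp - 1444 := by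
        have h1 : g.R + 0x24 = (g.e.reg .rsp).toNat - 1444 := by omega
        have h2 : (1444 : Nat) ≤ (g.e.reg .rsp).toNat := by omega
        rw [h1, ← addr_sub_lit _ _ h2, addr_toNat]
      have hinvN : abiInv s_114182 := by
        refine Vorbis.abiInv_of ?_ ?_
        · rw [w_flags]
          simp only [X86.User.df_setStatus]
          exact w_df_114174
        · rw [w_mxcsr]
          exact w_mx
      have hcodeN : CodeOK u₀ s_114182.mem := w_eq
      refine ReachVia.done (Or.inl (Or.inl ?_))
      refine Vorbis.Spec.start_decoder_8.at9_of hfr hhand hnoT hmidN w_rip (w_rsp.trans eR) ?_ hcodeN hinvN ?_ hb0N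
      · rw [w_kept.get .rbp rfl, c_rbp]
        exact (addr_toNat _).symm
      · show s_114182.mem.readLE (addr (g.R + 0x24)) 4 = 0
        rw [e24]
        exact hz0
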